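-- pv_equiv track=rewrite | github.com/komurugov/AoC | 2023/12/2.py | compl
-- ===== SOURCE A (Python) =====
-- def compl(cur, lens):
--     n = 0
--     j = 0
--     for i in range(len(cur)):
--         if cur[i] == '#':
--             n += 1
--         else:
--             if n != 0:
--                 if j >= len(lens) or n != lens[j]:
--                     return False
--                 n = 0
--                 j += 1
--     if n != 0:
--         return j == len(lens) - 1 and n == lens[-1]
--     return j == len(lens)
-- ===== SOURCE B (Python) =====
-- def compl(cur, lens):
--     runs = [len(w) for w in "".join(c if c == '#' else ' ' for c in cur).split()]
--     return runs == list(lens)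
-- ===== Notes on version B (the rewrite author's own statement) =====
-- stated objective: idiomatic
-- what changed: Extract the list of consecutive-'#' run lengths in one expression (mask non-'#' to spaces, str.split, take lengths) and compare it to list(lens), replacing A's incremental counter/pointer scan with its early returns and special trailing-run branch.
import Mathlib
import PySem

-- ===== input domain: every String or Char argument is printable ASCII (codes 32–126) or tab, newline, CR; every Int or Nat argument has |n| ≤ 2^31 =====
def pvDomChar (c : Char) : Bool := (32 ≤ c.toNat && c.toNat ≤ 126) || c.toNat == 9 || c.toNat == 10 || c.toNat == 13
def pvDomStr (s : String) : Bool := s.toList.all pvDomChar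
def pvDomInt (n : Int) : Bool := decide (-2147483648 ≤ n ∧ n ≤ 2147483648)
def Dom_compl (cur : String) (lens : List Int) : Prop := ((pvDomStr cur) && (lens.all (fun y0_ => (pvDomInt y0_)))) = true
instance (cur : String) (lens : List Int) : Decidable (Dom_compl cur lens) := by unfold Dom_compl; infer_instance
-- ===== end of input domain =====

-- B replaces A's incremental counter/pointer scan (early returns, special trailing-run
-- branch) by extracting the list of '#'-run lengths and comparing it with lens (idiomatic).


-- ===== PORT A =====
-- the for-loop over cur with state (n, j) and early `return False`
def complLoop (cs : List Char) (n j : Int) (lens : List Int) : Bool :=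
  match cs with
  | [] =>
      -- trailing code after the loop
      if n ≠ 0 then
        decide (j = (lens.length : Int) - 1) && decide (PySem.List.pyGet? lens (-1) = some n)
      else decide (j = (lens.length : Int))
  | c :: rest =>
      if c = '#' then complLoop rest (n + 1) j lens
      else
        if n ≠ 0 then
          if j ≥ (lens.length : Int) ∨ PySem.List.pyGet? lens j ≠ some n then false
          else complLoop rest 0 (j + 1) lens
        else complLoop rest n j lens

def compl (cur : String) (lens : List Int) : Bool := complLoop cur.toList 0 0 lens

-- ===== PORT B =====
def compl_alt (cur : String) (lens : List Int) : Bool :=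
  let runs : List Int :=
    (PySem.Chars.split₀ (cur.toList.map (fun c => if c = '#' then '#' else ' '))).map
      (fun w => (w.length : Int))
  decide (runs = lens)

-- ===== PRECONDITION & SPEC =====
def Spec_compl (cur : String) (lens : List Int) (out : Bool) : Prop := out = compl_alt cur lens
instance (cur : String) (lens : List Int) (out : Bool) : Decidable (Spec_compl cur lens out) := by unfold Spec_compl; infer_instance

-- ===== CLAIM (what is proved, stated in full; the proofs are below) =====
def Claim_equal_compl : Prop := ∀ (cur : String) (lens : List Int), Dom_compl cur lens → Spec_compl cur lens (compl cur lens)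

-- ===== LEMMAS AND PROOFS =====

-- reference function: run lengths of cs given a partial run of length n already seen
def runsF : List Char → Int → List Int
  | [], n => if n = 0 then [] else [n]
  | c :: r, n => if c = '#' then runsF r (n + 1) else if n = 0 then runsF r 0 else n :: runsF r 0

-- B side: split₀.go on the masked string collects exactly the run lengths
lemma go_masked (cs : List Char) : ∀ (cur : List Char) (acc : List (List Char)),
    (PySem.Chars.split₀.go (cs.map (fun c => if c = '#' then '#' else ' ')) cur acc).map
        (fun w => (w.length : Int))
      = acc.reverse.map (fun w => (w.length : Int)) ++ runsF cs (cur.length : Int) := by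
  induction cs with
  | nil =>
      intro cur acc
      by_cases h : cur = []
      · subst h; simp [PySem.Chars.split₀.go, runsF]
      · simp [PySem.Chars.split₀.go, runsF, List.isEmpty_iff, h]
  | cons c r ih =>
      intro cur acc
      by_cases hc : c = '#'
      · subst hc
        rw [show (('#' :: r).map (fun c => if c = '#' then '#' else ' '))
              = '#' :: r.map (fun c => if c = '#' then '#' else ' ') from rfl,
            show ∀ t, PySem.Chars.split₀.go ('#' :: t) cur acc
              = PySem.Chars.split₀.go t ('#' :: cur) acc from fun _ => rfl,
            ih ('#' :: cur) acc,
            show runsF ('#' :: r) (cur.length : Int) = runsF r ((cur.length : Int) + 1) from rfl,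
            show ((('#' :: cur).length : Nat) : Int) = (cur.length : Int) + 1 by simp]
      · have hsp : PySem.Chars.isspace ' ' = true := by decide
        by_cases h : cur = []
        · subst h; simp [hc, PySem.Chars.split₀.go, hsp, ih, runsF]
        · simp [hc, PySem.Chars.split₀.go, hsp, List.isEmpty_iff, h, ih, runsF]

lemma alt_eq (cur : String) (lens : List Int) :
    compl_alt cur lens = decide (runsF cur.toList 0 = lens) := by
  have := go_masked cur.toList [] []
  simp [compl_alt, PySem.Chars.split₀]
  rw [this]
  simp

-- A side: the loop with state (n, j) decides whether the remaining runs equal lens.drop j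
lemma loop_eq (lens : List Int) (cs : List Char) : ∀ (nn jj : Nat), jj ≤ lens.length →
    complLoop cs (nn : Int) (jj : Int) lens = decide (runsF cs (nn : Int) = lens.drop jj) := by
  induction cs with
  | nil =>
      intro nn jj hj
      by_cases hn : nn = 0
      · subst hn
        norm_num [complLoop, runsF]
        omega
      · have hn' : (nn : Int) ≠ 0 := by exact_mod_cast hn
        simp only [complLoop, runsF, if_pos hn', if_neg hn']
        rcases Nat.eq_zero_or_pos lens.length with hlen | hlen
        · have : lens = [] := List.length_eq_zero_iff.mp hlen
          subst this
          simp
        · by_cases hjj : jj = lens.length - 1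
          · subst hjj
            have hlt : lens.length - 1 < lens.length := by omega
            have hdrop : lens.drop (lens.length - 1) = [lens[lens.length - 1]] := by
              rw [List.drop_eq_getElem_cons hlt]
              simp [List.drop_eq_nil_of_le (by omega : lens.length ≤ lens.length - 1 + 1)]
            have hget : PySem.List.pyGet? lens (-1) = some lens[lens.length - 1] := by
              simp [PySem.List.pyGet?, PySem.List.pyIdx?]
              rw [if_pos (by omega)]
              simp
            have hcast : ((lens.length - 1 : Nat) : Int) = (lens.length : Int) - 1 := by omega
            rw [hdrop, hget, hcast]
            simp [eq_comm]
          · have h1 : ¬ ((jj : Int) = (lens.length : Int) - 1) := by omega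
            have h2 : (lens.drop jj).length ≠ 1 := by
              rw [List.length_drop]; omega
            simp [h1]
            intro hcontra
            exact h2 (by rw [← hcontra]; simp)
  | cons c r ih =>
      intro nn jj hj
      by_cases hc : c = '#'
      · subst hc
        rw [show complLoop ('#' :: r) (nn : Int) (jj : Int) lens
              = complLoop r ((nn : Int) + 1) (jj : Int) lens from rfl,
            show runsF ('#' :: r) (nn : Int) = runsF r ((nn : Int) + 1) from rfl,
            show ((nn : Int) + 1) = ((nn + 1 : Nat) : Int) by push_cast; ring,
            ih (nn + 1) jj hj]
      · by_cases hn : nn = 0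
        · subst hn
          simp only [complLoop, runsF, if_neg hc]
          norm_num
          exact ih 0 jj hj
        · have hn' : (nn : Int) ≠ 0 := by exact_mod_cast hn
          simp only [complLoop, runsF, if_neg hc, if_pos hn', if_neg hn']
          by_cases hjl : jj < lens.length
          · have hge : ¬ ((jj : Int) ≥ (lens.length : Int)) := by omega
            have hget : PySem.List.pyGet? lens (jj : Int) = some lens[jj] := by
              rw [PySem.List.pyGet?_natCast]; simp [hjl]
            rw [List.drop_eq_getElem_cons hjl]
            by_cases heq : (nn : Int) = lens[jj]
            · rw [if_neg (by simp [hge, hget, heq]),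
                show ((jj : Int) + 1) = ((jj + 1 : Nat) : Int) by push_cast; ring]
              have h0 := ih 0 (jj + 1) (by omega)
              simp only [Nat.cast_zero] at h0
              rw [h0, decide_eq_decide]
              constructor
              · intro h; rw [h, heq]
              · intro h; exact (List.cons_eq_cons.mp h).2
            · rw [if_pos (Or.inr (by rw [hget]; simp; exact fun h => heq h.symm))]
              symm
              rw [decide_eq_false_iff_not]
              intro h
              exact heq (List.cons_eq_cons.mp h).1
          · have hjj : jj = lens.length := by omega
            have hdrop : lens.drop jj = [] := List.drop_eq_nil_of_le (by omega)
            simp [hjj]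

-- ===== VERDICT (by name: the statement is the Claim_ definition above) =====
theorem compl_spec : Claim_equal_compl := by
  intro cur lens _
  unfold Spec_compl
  rw [alt_eq]
  have h := loop_eq lens cur.toList 0 0 (Nat.zero_le _)
  simp only [Nat.cast_zero, List.drop_zero] at h
  exact h
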